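-- pv_equiv track=rewrite | github.com/TheDrimo/Feu | feu03.py | affichage
-- ===== SOURCE A (Python) =====
-- import string
--
-- def affichage(botte, forme, coordonnees):
-- 	botte = [t.strip("\n") for t in botte]
-- 	forme = [t.strip("\n") for t in forme]
-- 	hauteur_botte = len(botte)
-- 	figure = ""
-- 	for y in range(0, hauteur_botte) :
-- 		for x in range(0, len(botte[y])) :
-- 			ajout = "-"
-- 			xforme = x - coordonnees[0]
-- 			yforme = y - coordonnees[1]
-- 			hauteur_forme = len(forme)
-- 			if (yforme >= 0) & (yforme < hauteur_forme) :
-- 				longueur_forme, hauteur_forme = len(forme[yforme]), len(forme)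
-- 				if (xforme >= 0) & (xforme < longueur_forme) :
-- 					caseforme = forme[yforme][xforme]
-- 					if caseforme in string.digits :
-- 						ajout = caseforme
-- 			figure += ajout
-- 		figure += "\n"
-- 	return figure
-- ===== SOURCE B (Python) =====
-- import string
--
-- def affichage(botte, forme, coordonnees):
--     rows = [['-'] * len(t.strip("\n")) for t in botte]
--     stamped = [t.strip("\n") for t in forme]
--     for yforme, line in enumerate(stamped):
--         y = yforme + coordonnees[1]
--         if 0 <= y < len(rows):
--             for xforme, ch in enumerate(line):
--                 x = xforme + coordonnees[0]
--                 if ch in string.digits and 0 <= x < len(rows[y]):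
--                     rows[y][x] = ch
--     return ''.join(''.join(r) + '\n' for r in rows)
-- ===== Notes on version B (the rewrite author's own statement) =====
-- stated objective: alternative
-- what changed: B allocates the dash grid once and loops over the figure to stamp its digit cells onto the grid (write-side iteration with bounds checks), instead of A's per-grid-cell reverse lookup into the figure.
import Mathlib
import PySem

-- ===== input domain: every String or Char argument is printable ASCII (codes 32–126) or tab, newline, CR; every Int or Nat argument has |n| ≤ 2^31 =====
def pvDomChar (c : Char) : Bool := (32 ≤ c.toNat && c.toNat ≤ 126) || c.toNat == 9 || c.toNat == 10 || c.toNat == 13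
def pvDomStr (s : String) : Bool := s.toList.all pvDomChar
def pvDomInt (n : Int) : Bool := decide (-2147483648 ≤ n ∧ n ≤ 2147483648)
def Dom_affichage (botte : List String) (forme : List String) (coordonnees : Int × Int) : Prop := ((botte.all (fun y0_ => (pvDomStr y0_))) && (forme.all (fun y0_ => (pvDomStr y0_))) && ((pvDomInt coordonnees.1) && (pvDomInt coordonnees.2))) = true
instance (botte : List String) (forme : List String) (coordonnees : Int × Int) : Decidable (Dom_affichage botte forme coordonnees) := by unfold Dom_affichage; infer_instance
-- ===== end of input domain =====

-- B stamps the figure's digit cells onto a pre-allocated dash grid (write-side iteration) instead of A's per-grid-cell reverse lookup into the figure; same output, proven equal on all inputs.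


-- t.strip("\n") as a List Char (shared by both ports: both Pythons call the same builtin)
def pvStripNl (s : String) : List Char := PySem.Chars.stripChars s.toList ['\n']

-- ===== PORT A =====
-- the character A appends for grid cell (y, x): '-' unless the figure has a digit there
-- (`caseforme in string.digits` on a single char = PySem.Chars.isdigit)
def pvCellA (forme' : List (List Char)) (c : Int × Int) (y x : Nat) : Char :=
  let xforme : Int := (x : Int) - c.1
  let yforme : Int := (y : Int) - c.2
  if 0 ≤ yforme ∧ yforme < (forme'.length : Int) then
    let row := forme'.getD yforme.toNat []
    if 0 ≤ xforme ∧ xforme < (row.length : Int) then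
      let caseforme := row.getD xforme.toNat ' '
      if PySem.Chars.isdigit caseforme then caseforme else '-'
    else '-'
  else '-'

def affichage (botte : List String) (forme : List String) (coordonnees : Int × Int) : String :=
  let botte' := botte.map pvStripNl
  let forme' := forme.map pvStripNl
  String.ofList ((List.range botte'.length).foldl (fun fig y =>
    ((List.range (botte'.getD y []).length).foldl
        (fun fig2 x => fig2 ++ [pvCellA forme' coordonnees y x]) fig) ++ ['\n']) [])

-- ===== PORT B =====
-- rows[y][x] = ch  (guarded: ch is a digit and 0 <= x < len(rows[y]))
def pvStampCell (rows : List (List Char)) (y : Nat) (x : Int) (ch : Char) : List (List Char) :=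
  if PySem.Chars.isdigit ch ∧ 0 ≤ x ∧ x < ((rows.getD y []).length : Int)
  then rows.set y ((rows.getD y []).set x.toNat ch) else rows

-- B's inner loop: for xforme, ch in enumerate(line)
def pvStampRow (c0 : Int) (rows : List (List Char)) (y : Nat) (line : List Char) : List (List Char) :=
  (PySem.List.enumerate line).foldl (fun rs q => pvStampCell rs y (q.1 + c0) q.2) rows

-- B's outer loop: for yforme, line in enumerate(stamped), with the 0 <= y < len(rows) guard
def pvStampAll (c : Int × Int) (rows0 : List (List Char)) (forme' : List (List Char)) : List (List Char) :=
  (PySem.List.enumerate forme').foldl (fun rs p =>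
    if 0 ≤ p.1 + c.2 ∧ p.1 + c.2 < (rs.length : Int) then pvStampRow c.1 rs (p.1 + c.2).toNat p.2 else rs) rows0

def affichage_alt (botte : List String) (forme : List String) (coordonnees : Int × Int) : String :=
  let rows0 : List (List Char) := botte.map (fun t => (pvStripNl t).map (fun _ => '-'))
  let forme' := forme.map pvStripNl
  let rows := pvStampAll coordonnees rows0 forme'
  String.ofList ((rows.map (fun r => r ++ ['\n'])).flatten)

-- ===== PRECONDITION & SPEC =====
def Spec_affichage (botte : List String) (forme : List String) (coordonnees : Int × Int) (out : String) : Prop := out = affichage_alt botte forme coordonnees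
instance (botte : List String) (forme : List String) (coordonnees : Int × Int) (out : String) : Decidable (Spec_affichage botte forme coordonnees out) := by unfold Spec_affichage; infer_instance

-- ===== CLAIM (what is proved, stated in full; the proofs are below) =====
def Claim_equal_affichage : Prop := ∀ (botte : List String) (forme : List String) (coordonnees : Int × Int), Dom_affichage botte forme coordonnees → Spec_affichage botte forme coordonnees (affichage botte forme coordonnees)

-- ===== LEMMAS AND PROOFS =====

theorem pvGetD_set {α : Type} (l : List α) (i j : Nat) (a : α) (d : α) :
    (l.set i a).getD j d = if i = j ∧ i < l.length then a else l.getD j d := by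
  simp only [List.getD_eq_getElem?_getD, List.getElem?_set]
  split_ifs with h1 h2 h3 <;> try rfl
  all_goals try omega
  rw [List.getElem?_eq_none (by omega)]

def pvGetE (rows : List (List Char)) (y x : Nat) : Char := (rows.getD y []).getD x '-'

theorem pvStampCell_getE (rows : List (List Char)) (y0 : Nat) (x0 : Int) (ch : Char) (y x : Nat) :
    pvGetE (pvStampCell rows y0 x0 ch) y x =
      if y = y0 ∧ (x : Int) = x0 ∧ PySem.Chars.isdigit ch = true ∧ x < (rows.getD y0 []).length
      then ch else pvGetE rows y x := by
  unfold pvStampCell pvGetE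
  split
  · rename_i hg
    obtain ⟨hd, hx0, hlt⟩ := hg
    have hy0 : y0 < rows.length := by
      by_contra hy0
      rw [List.getD_eq_default _ _ (by omega)] at hlt
      simp at hlt; omega
    rw [pvGetD_set]
    by_cases hy : y = y0
    · subst hy
      rw [if_pos ⟨rfl, hy0⟩, pvGetD_set]
      by_cases hx : (x : Int) = x0
      · rw [if_pos ⟨by omega, by omega⟩, if_pos ⟨rfl, hx, hd, by omega⟩]
      · rw [if_neg (by omega), if_neg (by intro h; exact hx h.2.1)]
    · rw [if_neg (by omega), if_neg (by intro h; exact hy h.1)]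
  · rename_i hg
    rw [if_neg]
    intro ⟨h1, h2, h3, h4⟩
    exact hg ⟨h3, by omega, by omega⟩

theorem pvStampCell_length (rows : List (List Char)) (y0 : Nat) (x0 : Int) (ch : Char) :
    (pvStampCell rows y0 x0 ch).length = rows.length := by
  unfold pvStampCell; split <;> simp

theorem pvStampCell_rowlen (rows : List (List Char)) (y0 : Nat) (x0 : Int) (ch : Char) (i : Nat) :
    ((pvStampCell rows y0 x0 ch).getD i []).length = (rows.getD i []).length := by
  unfold pvStampCell
  split
  · rw [pvGetD_set]
    split
    · rename_i h; rw [← h.1]; simp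
    · rfl
  · rfl

theorem pvStampRowAux_getE (c0 : Int) (y0 : Nat) (y x : Nat) :
    ∀ (line : List Char) (s : Int) (rows : List (List Char)),
    pvGetE ((PySem.List.enumerate line s).foldl (fun rs p => pvStampCell rs y0 (p.1 + c0) p.2) rows) y x =
      (if y = y0 ∧ 0 ≤ (x : Int) - c0 - s ∧ (x : Int) - c0 - s < (line.length : Int) ∧
          PySem.Chars.isdigit (line.getD ((x : Int) - c0 - s).toNat ' ') = true ∧
          x < (rows.getD y0 []).length
       then line.getD ((x : Int) - c0 - s).toNat ' ' else pvGetE rows y x)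
  | [], s, rows => by
    simp [PySem.List.enumerate_nil]
    intro h; omega
  | ch :: t, s, rows => by
    rw [PySem.List.enumerate_cons, List.foldl_cons,
        pvStampRowAux_getE c0 y0 y x t (s + 1) (pvStampCell rows y0 (s + c0) ch),
        pvStampCell_rowlen, pvStampCell_getE]
    by_cases hy : y = y0
    case neg =>
      rw [if_neg (c := y = y0 ∧ _) (fun h => hy h.1),
          if_neg (c := y = y0 ∧ _) (fun h => hy h.1),
          if_neg (c := y = y0 ∧ _) (fun h => hy h.1)]
    case pos =>
      subst hy
      by_cases hd0 : (x : Int) - c0 - s = 0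
      · have hAt : ¬ (y = y ∧ 0 ≤ (x : Int) - c0 - (s + 1) ∧ (x : Int) - c0 - (s + 1) < (t.length : Int) ∧
            PySem.Chars.isdigit (t.getD ((x : Int) - c0 - (s + 1)).toNat ' ') = true ∧
            x < (rows.getD y []).length) := fun h => absurd h.2.1 (by omega)
        rw [if_neg hAt]
        have hgd : (ch :: t).getD ((x : Int) - c0 - s).toNat ' ' = ch := by
          rw [hd0]; rfl
        by_cases hrest : PySem.Chars.isdigit ch = true ∧ x < (rows.getD y []).length
        · have hAcell : y = y ∧ (x : Int) = s + c0 ∧ PySem.Chars.isdigit ch = true ∧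
              x < (rows.getD y []).length := by refine ⟨rfl, ?_, hrest.1, hrest.2⟩; omega
          have hAcons : y = y ∧ 0 ≤ (x : Int) - c0 - s ∧ (x : Int) - c0 - s < ((ch :: t).length : Int) ∧
              PySem.Chars.isdigit ((ch :: t).getD ((x : Int) - c0 - s).toNat ' ') = true ∧
              x < (rows.getD y []).length := by exact ⟨rfl, by omega, by simp only [List.length_cons]; push_cast; omega, by rw [hgd]; exact hrest.1, hrest.2⟩
          rw [if_pos hAcell, if_pos hAcons, hgd]
        · have hAcell : ¬ (y = y ∧ (x : Int) = s + c0 ∧ PySem.Chars.isdigit ch = true ∧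
              x < (rows.getD y []).length) := fun h => hrest ⟨h.2.2.1, h.2.2.2⟩
          have hAcons : ¬ (y = y ∧ 0 ≤ (x : Int) - c0 - s ∧ (x : Int) - c0 - s < ((ch :: t).length : Int) ∧
              PySem.Chars.isdigit ((ch :: t).getD ((x : Int) - c0 - s).toNat ' ') = true ∧
              x < (rows.getD y []).length) := fun h => hrest ⟨by rw [hgd] at h; exact h.2.2.2.1, h.2.2.2.2⟩
          rw [if_neg hAcell, if_neg hAcons]
      · have hAcell : ¬ (y = y ∧ (x : Int) = s + c0 ∧ PySem.Chars.isdigit ch = true ∧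
            x < (rows.getD y []).length) := fun h => absurd h.2.1 (by omega)
        rw [if_neg hAcell]
        by_cases hneg : (x : Int) - c0 - s < 0
        · have hAt : ¬ (y = y ∧ 0 ≤ (x : Int) - c0 - (s + 1) ∧ (x : Int) - c0 - (s + 1) < (t.length : Int) ∧
              PySem.Chars.isdigit (t.getD ((x : Int) - c0 - (s + 1)).toNat ' ') = true ∧
              x < (rows.getD y []).length) := fun h => absurd h.2.1 (by omega)
          have hAcons : ¬ (y = y ∧ 0 ≤ (x : Int) - c0 - s ∧ (x : Int) - c0 - s < ((ch :: t).length : Int) ∧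
              PySem.Chars.isdigit ((ch :: t).getD ((x : Int) - c0 - s).toNat ' ') = true ∧
              x < (rows.getD y []).length) := fun h => absurd h.2.1 (by omega)
          rw [if_neg hAt, if_neg hAcons]
        · have h1 : ((x : Int) - c0 - s).toNat = ((x : Int) - c0 - (s + 1)).toNat + 1 := by omega
          have hgd : (ch :: t).getD ((x : Int) - c0 - s).toNat ' ' =
              t.getD ((x : Int) - c0 - (s + 1)).toNat ' ' := by
            rw [h1]; rfl
          by_cases hc : y = y ∧ 0 ≤ (x : Int) - c0 - (s + 1) ∧ (x : Int) - c0 - (s + 1) < (t.length : Int) ∧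
              PySem.Chars.isdigit (t.getD ((x : Int) - c0 - (s + 1)).toNat ' ') = true ∧
              x < (rows.getD y []).length
          · obtain ⟨-, ha, hb, hcd, he⟩ := hc
            have hAcons : y = y ∧ 0 ≤ (x : Int) - c0 - s ∧ (x : Int) - c0 - s < ((ch :: t).length : Int) ∧
                PySem.Chars.isdigit ((ch :: t).getD ((x : Int) - c0 - s).toNat ' ') = true ∧
                x < (rows.getD y []).length :=
              by exact ⟨rfl, by omega, by simp only [List.length_cons] at hb ⊢; push_cast at hb ⊢; omega, by rw [hgd]; exact hcd, he⟩
            rw [if_pos ⟨rfl, ha, hb, hcd, he⟩, if_pos hAcons, hgd]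
          · have hAcons : ¬ (y = y ∧ 0 ≤ (x : Int) - c0 - s ∧ (x : Int) - c0 - s < ((ch :: t).length : Int) ∧
                PySem.Chars.isdigit ((ch :: t).getD ((x : Int) - c0 - s).toNat ' ') = true ∧
                x < (rows.getD y []).length) := by
              intro h
              obtain ⟨-, ha, hb, hcd, he⟩ := h
              rw [hgd] at hcd
              exact hc ⟨rfl, by omega, by simp only [List.length_cons] at hb ⊢; push_cast at hb ⊢; omega, hcd, he⟩
            rw [if_neg hc, if_neg hAcons]

theorem pvFoldRow_length (c0 : Int) (y0 : Nat) :
    ∀ (line : List Char) (s : Int) (rows : List (List Char)),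
    ((PySem.List.enumerate line s).foldl (fun rs p => pvStampCell rs y0 (p.1 + c0) p.2) rows).length = rows.length
  | [], s, rows => by simp [PySem.List.enumerate_nil]
  | ch :: t, s, rows => by
    rw [PySem.List.enumerate_cons, List.foldl_cons, pvFoldRow_length c0 y0 t (s + 1), pvStampCell_length]

theorem pvFoldRow_rowlen (c0 : Int) (y0 : Nat) (i : Nat) :
    ∀ (line : List Char) (s : Int) (rows : List (List Char)),
    (((PySem.List.enumerate line s).foldl (fun rs p => pvStampCell rs y0 (p.1 + c0) p.2) rows).getD i []).length = (rows.getD i []).length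
  | [], s, rows => by simp [PySem.List.enumerate_nil]
  | ch :: t, s, rows => by
    rw [PySem.List.enumerate_cons, List.foldl_cons, pvFoldRow_rowlen c0 y0 i t (s + 1), pvStampCell_rowlen]

-- index shift between the `forme' = line :: t` condition at start s and the tail condition at start s+1

theorem pvShiftCons (c : Int × Int) (y x : Nat) (line : List Char) (t : List (List Char))
    (s : Int) (rows : List (List Char)) (he0 : (y : Int) - c.2 - s ≠ 0) :
    (if 0 ≤ (y : Int) - c.2 - (s + 1) ∧ (y : Int) - c.2 - (s + 1) < (t.length : Int) ∧
        0 ≤ (x : Int) - c.1 ∧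
        (x : Int) - c.1 < ((t.getD ((y : Int) - c.2 - (s + 1)).toNat []).length : Int) ∧
        PySem.Chars.isdigit ((t.getD ((y : Int) - c.2 - (s + 1)).toNat []).getD ((x : Int) - c.1).toNat ' ') = true ∧
        x < (rows.getD y []).length
     then (t.getD ((y : Int) - c.2 - (s + 1)).toNat []).getD ((x : Int) - c.1).toNat ' '
     else pvGetE rows y x) =
    (if 0 ≤ (y : Int) - c.2 - s ∧ (y : Int) - c.2 - s < ((line :: t).length : Int) ∧
        0 ≤ (x : Int) - c.1 ∧
        (x : Int) - c.1 < (((line :: t).getD ((y : Int) - c.2 - s).toNat []).length : Int) ∧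
        PySem.Chars.isdigit (((line :: t).getD ((y : Int) - c.2 - s).toNat []).getD ((x : Int) - c.1).toNat ' ') = true ∧
        x < (rows.getD y []).length
     then ((line :: t).getD ((y : Int) - c.2 - s).toNat []).getD ((x : Int) - c.1).toNat ' '
     else pvGetE rows y x) := by
  by_cases hneg : (y : Int) - c.2 - s < 0
  · rw [if_neg (fun h => absurd h.1 (by omega)), if_neg (fun h => absurd h.1 (by omega))]
  · have h1 : ((y : Int) - c.2 - s).toNat = ((y : Int) - c.2 - (s + 1)).toNat + 1 := by omega
    have hgd : (line :: t).getD ((y : Int) - c.2 - s).toNat [] =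
        t.getD ((y : Int) - c.2 - (s + 1)).toNat [] := by rw [h1]; rfl
    rw [hgd]
    by_cases hfull : 0 ≤ (y : Int) - c.2 - (s + 1) ∧ (y : Int) - c.2 - (s + 1) < (t.length : Int) ∧
        0 ≤ (x : Int) - c.1 ∧
        (x : Int) - c.1 < ((t.getD ((y : Int) - c.2 - (s + 1)).toNat []).length : Int) ∧
        PySem.Chars.isdigit ((t.getD ((y : Int) - c.2 - (s + 1)).toNat []).getD ((x : Int) - c.1).toNat ' ') = true ∧
        x < (rows.getD y []).length
    · obtain ⟨a1, a2, rest⟩ := hfull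
      rw [if_pos ⟨a1, a2, rest⟩,
          if_pos ⟨by omega, by simp only [List.length_cons]; push_cast at a2 ⊢; omega, rest⟩]
    · rw [if_neg hfull, if_neg]
      intro h
      obtain ⟨a1, a2, rest⟩ := h
      simp only [List.length_cons] at a2
      exact hfull ⟨by omega, by push_cast at a2 ⊢; omega, rest⟩

theorem pvStampAllAux_getE (c : Int × Int) (y x : Nat) :
    ∀ (forme' : List (List Char)) (s : Int) (rows : List (List Char)), y < rows.length →
    pvGetE ((PySem.List.enumerate forme' s).foldl (fun rs p =>
        if 0 ≤ p.1 + c.2 ∧ p.1 + c.2 < (rs.length : Int) then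
          (PySem.List.enumerate p.2).foldl (fun rs2 q => pvStampCell rs2 (p.1 + c.2).toNat (q.1 + c.1) q.2) rs
        else rs) rows) y x =
      (if 0 ≤ (y : Int) - c.2 - s ∧ (y : Int) - c.2 - s < (forme'.length : Int) ∧
          0 ≤ (x : Int) - c.1 ∧
          (x : Int) - c.1 < ((forme'.getD ((y : Int) - c.2 - s).toNat []).length : Int) ∧
          PySem.Chars.isdigit ((forme'.getD ((y : Int) - c.2 - s).toNat []).getD ((x : Int) - c.1).toNat ' ') = true ∧
          x < (rows.getD y []).length
       then (forme'.getD ((y : Int) - c.2 - s).toNat []).getD ((x : Int) - c.1).toNat ' '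
       else pvGetE rows y x)
  | [], s, rows, hy => by
    simp [PySem.List.enumerate_nil]
    intro h; omega
  | line :: t, s, rows, hy => by
    rw [PySem.List.enumerate_cons, List.foldl_cons]
    by_cases he0 : (y : Int) - c.2 - s = 0
    · have hg : 0 ≤ s + c.2 ∧ s + c.2 < (rows.length : Int) := by omega
      simp only []
      rw [if_pos hg]
      have hyy : (s + c.2).toNat = y := by omega
      rw [hyy]
      rw [pvStampAllAux_getE c y x t (s + 1)
            ((PySem.List.enumerate line).foldl (fun rs2 q => pvStampCell rs2 y (q.1 + c.1) q.2) rows)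
            (by rw [pvFoldRow_length c.1 y line 0 rows]; exact hy)]
      rw [if_neg (fun h => absurd h.1 (by omega :
            ¬ (0 ≤ (y : Int) - c.2 - (s + 1))))]
      rw [pvStampRowAux_getE c.1 y y x line 0 rows]
      rw [he0, Int.toNat_zero, List.getD_cons_zero, sub_zero]
      by_cases hx : 0 ≤ (x : Int) - c.1 ∧ (x : Int) - c.1 < (line.length : Int) ∧
          PySem.Chars.isdigit (line.getD ((x : Int) - c.1).toNat ' ') = true ∧
          x < (rows.getD y []).length
      · obtain ⟨h1, h2, h3, h4⟩ := hx
        rw [if_pos ⟨rfl, h1, h2, h3, h4⟩,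
            if_pos ⟨le_refl 0, by simp only [List.length_cons]; push_cast; omega, h1, h2, h3, h4⟩]
      · rw [if_neg (fun h => hx ⟨h.2.1, h.2.2.1, h.2.2.2.1, h.2.2.2.2⟩),
            if_neg (fun h => hx ⟨h.2.2.1, h.2.2.2.1, h.2.2.2.2.1, h.2.2.2.2.2⟩)]
    · simp only []
      by_cases hg : 0 ≤ s + c.2 ∧ s + c.2 < (rows.length : Int)
      · rw [if_pos hg]
        have hy0ne : (s + c.2).toNat ≠ y := by omega
        rw [pvStampAllAux_getE c y x t (s + 1)
              ((PySem.List.enumerate line).foldl (fun rs2 q => pvStampCell rs2 (s + c.2).toNat (q.1 + c.1) q.2) rows)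
              (by rw [pvFoldRow_length c.1 ((s + c.2).toNat) line 0 rows]; exact hy)]
        rw [pvFoldRow_rowlen c.1 ((s + c.2).toNat) y line 0 rows]
        have hget1 : pvGetE ((PySem.List.enumerate line).foldl
            (fun rs2 q => pvStampCell rs2 (s + c.2).toNat (q.1 + c.1) q.2) rows) y x = pvGetE rows y x := by
          rw [pvStampRowAux_getE c.1 ((s + c.2).toNat) y x line 0 rows,
              if_neg (fun h => hy0ne (h.1.symm))]
        rw [hget1]
        exact pvShiftCons c y x line t s rows he0
      · rw [if_neg hg]
        rw [pvStampAllAux_getE c y x t (s + 1) rows hy]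
        exact pvShiftCons c y x line t s rows he0

theorem pvFoldAll_length (c : Int × Int) :
    ∀ (forme' : List (List Char)) (s : Int) (rows : List (List Char)),
    ((PySem.List.enumerate forme' s).foldl (fun rs p =>
        if 0 ≤ p.1 + c.2 ∧ p.1 + c.2 < (rs.length : Int) then pvStampRow c.1 rs (p.1 + c.2).toNat p.2 else rs) rows).length
      = rows.length
  | [], s, rows => by simp [PySem.List.enumerate_nil]
  | line :: t, s, rows => by
    rw [PySem.List.enumerate_cons, List.foldl_cons, pvFoldAll_length c t (s + 1)]
    split
    · exact pvFoldRow_length c.1 _ line 0 rows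
    · rfl

theorem pvFoldAll_rowlen (c : Int × Int) (i : Nat) :
    ∀ (forme' : List (List Char)) (s : Int) (rows : List (List Char)),
    (((PySem.List.enumerate forme' s).foldl (fun rs p =>
        if 0 ≤ p.1 + c.2 ∧ p.1 + c.2 < (rs.length : Int) then pvStampRow c.1 rs (p.1 + c.2).toNat p.2 else rs) rows).getD i []).length
      = (rows.getD i []).length
  | [], s, rows => by simp [PySem.List.enumerate_nil]
  | line :: t, s, rows => by
    rw [PySem.List.enumerate_cons, List.foldl_cons, pvFoldAll_rowlen c i t (s + 1)]
    split
    · exact pvFoldRow_rowlen c.1 _ i line 0 rows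
    · rfl

theorem pvGetD_const {α β : Type} (l : List α) (x : Nat) (c : β) :
    (l.map (fun _ => c)).getD x c = c := by
  rcases Nat.lt_or_ge x l.length with h | h
  · rw [List.getD_eq_getElem?_getD, List.getElem?_map, List.getElem?_eq_getElem h]
    rfl
  · rw [List.getD_eq_default _ _ (by simpa using h)]

theorem pvGetE_rows0 (botte : List String) (y x : Nat) :
    pvGetE (botte.map (fun t => (pvStripNl t).map (fun _ => '-'))) y x = '-' := by
  unfold pvGetE
  rcases Nat.lt_or_ge y botte.length with h | h
  · have houter : (botte.map (fun t => (pvStripNl t).map (fun _ => '-'))).getD y [] =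
        (pvStripNl botte[y]).map (fun _ => '-') := by
      rw [List.getD_eq_getElem?_getD, List.getElem?_map, List.getElem?_eq_getElem h]
      rfl
    rw [houter, pvGetD_const]
  · have houter : (botte.map (fun t => (pvStripNl t).map (fun _ => '-'))).getD y [] = [] :=
      List.getD_eq_default _ _ (by simp only [List.length_map]; exact h)
    rw [houter]
    rfl

theorem pvCellA_eq (forme' : List (List Char)) (c : Int × Int) (y x : Nat) (L : Nat) (hx : x < L) :
    (if 0 ≤ (y : Int) - c.2 - 0 ∧ (y : Int) - c.2 - 0 < (forme'.length : Int) ∧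
        0 ≤ (x : Int) - c.1 ∧
        (x : Int) - c.1 < ((forme'.getD ((y : Int) - c.2 - 0).toNat []).length : Int) ∧
        PySem.Chars.isdigit ((forme'.getD ((y : Int) - c.2 - 0).toNat []).getD ((x : Int) - c.1).toNat ' ') = true ∧
        x < L
     then (forme'.getD ((y : Int) - c.2 - 0).toNat []).getD ((x : Int) - c.1).toNat ' '
     else '-') = pvCellA forme' c y x := by
  rw [sub_zero]
  unfold pvCellA
  by_cases h1 : 0 ≤ (y : Int) - c.2 ∧ (y : Int) - c.2 < (forme'.length : Int)
  · rw [if_pos h1]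
    by_cases h2 : 0 ≤ (x : Int) - c.1 ∧
        (x : Int) - c.1 < ((forme'.getD ((y : Int) - c.2).toNat []).length : Int)
    · rw [if_pos h2]
      by_cases h3 : PySem.Chars.isdigit ((forme'.getD ((y : Int) - c.2).toNat []).getD ((x : Int) - c.1).toNat ' ') = true
      · rw [if_pos ⟨h1.1, h1.2, h2.1, h2.2, h3, hx⟩, if_pos h3]
      · rw [if_neg (fun h => h3 h.2.2.2.2.1), if_neg h3]
    · rw [if_neg (fun h => h2 ⟨h.2.2.1, h.2.2.2.1⟩), if_neg h2]
  · rw [if_neg (fun h => h1 ⟨h.1, h.2.1⟩), if_neg h1]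

theorem pvRows_eq (botte forme : List String) (c : Int × Int) :
    pvStampAll c (botte.map (fun t => (pvStripNl t).map (fun _ => '-'))) (forme.map pvStripNl)
      = (List.range (botte.map pvStripNl).length).map
          (fun y => (List.range ((botte.map pvStripNl).getD y []).length).map
            (fun x => pvCellA (forme.map pvStripNl) c y x)) := by
  have hlen : (pvStampAll c (botte.map (fun t => (pvStripNl t).map (fun _ => '-'))) (forme.map pvStripNl)).length
      = botte.length := by
    unfold pvStampAll
    rw [pvFoldAll_length c (forme.map pvStripNl) 0]
    simp
  have hrow0 : ∀ i : Nat, i < botte.length →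
      ((botte.map (fun t => (pvStripNl t).map (fun _ => '-'))).getD i []).length
        = ((botte.map pvStripNl).getD i []).length := by
    intro i hi
    rw [List.getD_eq_getElem?_getD, List.getElem?_map, List.getElem?_eq_getElem hi,
        List.getD_eq_getElem?_getD, List.getElem?_map, List.getElem?_eq_getElem hi]
    simp
  apply List.ext_getElem
  · rw [hlen]; simp
  · intro i h1 h2
    rw [List.getElem_map, List.getElem_range]
    have hib : i < botte.length := by rwa [hlen] at h1
    have hgetDi : ∀ (l : List (List Char)) (hi : i < l.length), l[i] = l.getD i [] := by
      intro l hi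
      rw [List.getD_eq_getElem?_getD, List.getElem?_eq_getElem hi]
      rfl
    apply List.ext_getElem
    · rw [hgetDi _ h1]
      unfold pvStampAll
      rw [pvFoldAll_rowlen c i (forme.map pvStripNl) 0, hrow0 i hib]
      simp
    · intro x hx1 hx2
      rw [List.getElem_map, List.getElem_range]
      have hxl : x < ((botte.map (fun t => (pvStripNl t).map (fun _ => '-'))).getD i []).length := by
        rw [hrow0 i hib]
        rw [hgetDi _ h1] at hx1
        unfold pvStampAll at hx1
        rw [pvFoldAll_rowlen c i (forme.map pvStripNl) 0, hrow0 i hib] at hx1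
        exact hx1
      have hmain : pvGetE (pvStampAll c (botte.map (fun t => (pvStripNl t).map (fun _ => '-'))) (forme.map pvStripNl)) i x
          = pvCellA (forme.map pvStripNl) c i x := by
        unfold pvStampAll pvStampRow
        rw [pvStampAllAux_getE c i x (forme.map pvStripNl) 0
              (botte.map (fun t => (pvStripNl t).map (fun _ => '-'))) (by simpa using hib)]
        rw [pvGetE_rows0]
        exact pvCellA_eq (forme.map pvStripNl) c i x _ hxl
      rw [← hmain]
      unfold pvGetE
      rw [← hgetDi _ h1, List.getD_eq_getElem?_getD, List.getElem?_eq_getElem hx1]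
      rfl

theorem pvMain (botte forme : List String) (c : Int × Int) :
    affichage botte forme c = affichage_alt botte forme c := by
  unfold affichage affichage_alt
  simp only []
  rw [pvRows_eq]
  congr 1
  simp only [PySem.List.foldl_append_singleton_eq_map, List.append_assoc,
    PySem.List.foldl_append_eq_flatMap, List.nil_append, List.map_map, ← List.flatMap_def,
    Function.comp_def]

-- ===== VERDICT (by name: the statement is the Claim_ definition above) =====
theorem affichage_spec : Claim_equal_affichage := by
  intro botte forme coordonnees _
  unfold Spec_affichage
  exact pvMain botte forme coordonnees
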